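-- pv_equiv track=rewrite | github.com/zacld/fx | scripts/discover.py | extract_director
-- ===== SOURCE A (Python) =====
-- def extract_director(officers):
--     priority = ["finance-director","managing-director","chief-executive",
--                 "chief-financial-officer","commercial-director","director","company-secretary"]
--     for role in priority:
--         for o in officers:
--             if role in (o.get("officer_role","")).lower().replace(" ","-"):
--                 name = o.get("name","")
--                 if "," in name:
--                     p = name.split(",",1)
--                     name = f"{p[1].strip()} {p[0].strip().title()}"
--                 return {"name": name.strip(), "role": o.get("officer_role","Director")}
--     if officers:
--         name = officers[0].get("name","")
--         if "," in name:
--             p = name.split(",",1)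
--             name = f"{p[1].strip()} {p[0].strip().title()}"
--         return {"name": name.strip(), "role": officers[0].get("officer_role","Officer")}
--     return None
-- ===== SOURCE B (Python) =====
-- def extract_director(officers):
--     priority = ["finance-director","managing-director","chief-executive",
--                 "chief-financial-officer","commercial-director","director","company-secretary"]
--
--     def fmt(o, default_role):
--         name = o.get("name", "")
--         if "," in name:
--             p = name.split(",", 1)
--             name = f"{p[1].strip()} {p[0].strip().title()}"
--         return {"name": name.strip(), "role": o.get("officer_role", default_role)}
--
--     best, best_idx = None, len(priority)
--     for o in officers:
--         norm = o.get("officer_role", "").lower().replace(" ", "-")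
--         idx = next((i for i, r in enumerate(priority) if r in norm), len(priority))
--         if idx < best_idx:
--             best, best_idx = o, idx
--     if best is not None:
--         return fmt(best, "Director")
--     if officers:
--         return fmt(officers[0], "Officer")
--     return None
-- ===== Notes on version B (the rewrite author's own statement) =====
-- stated objective: alternative
-- what changed: Replaces A's priority-outer/officers-inner double scan with early return by a single fold over the officers that tracks the officer with the strictly smallest priority index (first-wins on ties), and extracts the name-reformatting duplicated in A into one fmt helper used by both the matched ('Director') and fallback ('Officer') branches.
import Mathlib
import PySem

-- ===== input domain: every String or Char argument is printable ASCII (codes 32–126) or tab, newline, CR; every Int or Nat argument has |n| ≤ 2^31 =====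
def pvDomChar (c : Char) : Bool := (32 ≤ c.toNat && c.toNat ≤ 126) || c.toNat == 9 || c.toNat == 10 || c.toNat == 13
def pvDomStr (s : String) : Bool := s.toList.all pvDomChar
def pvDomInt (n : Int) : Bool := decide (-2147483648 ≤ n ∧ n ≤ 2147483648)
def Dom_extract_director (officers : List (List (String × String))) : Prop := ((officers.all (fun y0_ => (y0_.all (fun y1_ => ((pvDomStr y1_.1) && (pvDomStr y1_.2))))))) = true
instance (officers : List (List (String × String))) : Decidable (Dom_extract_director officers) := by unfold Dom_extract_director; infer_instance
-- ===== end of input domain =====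

-- B replaces A's priority-outer/officers-inner double scan by a single pass over the
-- officers tracking the officer with the smallest priority index (strict <, first wins),
-- with the name-reformatting extracted into one helper; alternative decomposition, no speed claim.


-- shared primitive: Python str.title(), ported by hand (PySem has no title);
-- exact on ASCII, where 'cased character' = letter: first letter of each
-- maximal letter-run is uppercased, the following letters lowercased.
def pyTitleAux : List Char → Bool → List Char
  | [], _ => []
  | c :: cs, prev =>
    (if PySem.Chars.isalpha c then
        (if prev then PySem.Chars.lowerChar c else PySem.Chars.upperChar c)
      else c) :: pyTitleAux cs (PySem.Chars.isalpha c)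

def pyTitle (s : String) : String := String.ofList (pyTitleAux s.toList false)

-- the shared literal 'priority' list both Pythons declare
def priorityList : List String :=
  ["finance-director", "managing-director", "chief-executive",
   "chief-financial-officer", "commercial-director", "director", "company-secretary"]

-- ===== PORT A =====
-- inner 'for o in officers: if role in …: … return …' loop (early return ⇒ Option)
def edA_inner (role : String) : List (List (String × String)) → Option (List (String × String))
  | [] => none
  | o :: rest =>
    if PySem.Str.isIn role
        (PySem.Str.replace (PySem.Str.lower ((PySem.Dict.mk o).getD "officer_role" "")) " " "-") then
      let name := (PySem.Dict.mk o).getD "name" ""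
      let name :=
        if PySem.Str.isIn "," name then
          match PySem.Str.splitMax? name "," 1 with
          | some (p0 :: p1 :: _) => PySem.Str.strip p1 ++ " " ++ pyTitle (PySem.Str.strip p0)
          | _ => name   -- unreachable: split(",",1) on a string containing "," gives 2 parts
        else name
      some [("name", PySem.Str.strip name), ("role", (PySem.Dict.mk o).getD "officer_role" "Director")]
    else edA_inner role rest

-- outer 'for role in priority' loop
def edA_outer (offs : List (List (String × String))) : List String → Option (List (String × String))
  | [] => none
  | role :: roles =>
    match edA_inner role offs with
    | some r => some r
    | none => edA_outer offs roles

def extract_director (officers : List (List (String × String))) : Option (List (String × String)) :=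
  match edA_outer officers priorityList with
  | some r => some r
  | none =>
    match officers with
    | [] => none
    | o0 :: _ =>
      let name := (PySem.Dict.mk o0).getD "name" ""
      let name :=
        if PySem.Str.isIn "," name then
          match PySem.Str.splitMax? name "," 1 with
          | some (p0 :: p1 :: _) => PySem.Str.strip p1 ++ " " ++ pyTitle (PySem.Str.strip p0)
          | _ => name   -- unreachable, as above
        else name
      some [("name", PySem.Str.strip name), ("role", (PySem.Dict.mk o0).getD "officer_role" "Officer")]

-- ===== PORT B =====
-- fmt(o, default_role): name reformatting + result dict; helper shared by both branches of B
def edB_fmt (o : List (String × String)) (defaultRole : String) : List (String × String) :=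
  let name := (PySem.Dict.mk o).getD "name" ""
  let name :=
    if PySem.Str.isIn "," name then
      match PySem.Str.splitMax? name "," 1 with
      | some (p0 :: p1 :: _) => PySem.Str.strip p1 ++ " " ++ pyTitle (PySem.Str.strip p0)
      | _ => name
    else name
  [("name", PySem.Str.strip name), ("role", (PySem.Dict.mk o).getD "officer_role" defaultRole)]

-- next((i for i, r in enumerate(priority) if r in norm), len(priority))
def edB_firstIdx : List String → String → Nat
  | [], _ => 0
  | r :: rs, s => if PySem.Str.isIn r s then 0 else edB_firstIdx rs s + 1

def edB_norm (o : List (String × String)) : String :=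
  PySem.Str.replace (PySem.Str.lower ((PySem.Dict.mk o).getD "officer_role" "")) " " "-"

-- loop body of B's single pass: keep the officer with the strictly smallest index so far
def edB_step (st : Option (List (String × String)) × Nat) (o : List (String × String)) :
    Option (List (String × String)) × Nat :=
  let idx := edB_firstIdx priorityList (edB_norm o)
  if idx < st.2 then (some o, idx) else st

def extract_director_alt (officers : List (List (String × String))) : Option (List (String × String)) :=
  let st := officers.foldl edB_step (none, priorityList.length)
  match st.1 with
  | some o => some (edB_fmt o "Director")
  | none =>
    match officers with
    | [] => none
    | o0 :: _ => some (edB_fmt o0 "Officer")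

-- ===== PRECONDITION & SPEC =====
def Spec_extract_director (officers : List (List (String × String))) (out : Option (List (String × String))) : Prop := out = extract_director_alt officers
instance (officers : List (List (String × String))) (out : Option (List (String × String))) : Decidable (Spec_extract_director officers out) := by unfold Spec_extract_director; infer_instance

-- ===== CLAIM (what is proved, stated in full; the proofs are below) =====
def Claim_equal_extract_director : Prop := ∀ (officers : List (List (String × String))), Dom_extract_director officers → Spec_extract_director officers (extract_director officers)

-- ===== LEMMAS AND PROOFS =====

-- abbreviation for the priority index of an officer
def edIdx (o : List (String × String)) : Nat := edB_firstIdx priorityList (edB_norm o)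

-- defining equations of edA_inner (by rfl; 'unfold' on it is expensive)
theorem edA_inner_nil (role : String) : edA_inner role [] = none := rfl
theorem edA_inner_cons (role : String) (o : List (String × String)) (rest : List (List (String × String))) :
    edA_inner role (o :: rest) =
      if PySem.Str.isIn role (edB_norm o) = true then some (edB_fmt o "Director")
      else edA_inner role rest := rfl

-- the inner loop of A is a find? followed by the formatting
theorem edA_inner_eq (role : String) (l : List (List (String × String))) :
    edA_inner role l =
      (l.find? (fun o => PySem.Str.isIn role (edB_norm o))).map (fun o => edB_fmt o "Director") := by
  induction l with
  | nil => rw [edA_inner_nil]; rfl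
  | cons o rest ih =>
    rw [edA_inner_cons, List.find?_cons]
    by_cases h : PySem.Str.isIn role (edB_norm o) = true
    · rw [if_pos h]
      simp only [h]
      rfl
    · have h' := Bool.not_eq_true _ |>.mp h
      rw [if_neg h]
      simp only [h']
      exact ih

-- if role = priority[c] does not occur in s and the first index is ≥ c, it is ≥ c+1
theorem edB_firstIdx_ge_succ (rs : List String) (c : Nat) (role : String) (rest : List String)
    (s : String) (hd : rs.drop c = role :: rest) (hge : c ≤ edB_firstIdx rs s)
    (hno : ¬ PySem.Str.isIn role s = true) : c + 1 ≤ edB_firstIdx rs s := by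
  induction rs generalizing c with
  | nil => simp at hd
  | cons r rs ih =>
    cases c with
    | zero =>
      rw [List.drop_zero] at hd
      injection hd with h1 h2
      subst h1
      simp only [edB_firstIdx]
      rw [if_neg hno]
      omega
    | succ c =>
      rw [List.drop_succ_cons] at hd
      simp only [edB_firstIdx] at hge ⊢
      by_cases h : PySem.Str.isIn r s = true
      · rw [if_pos h] at hge; omega
      · rw [if_neg h] at hge ⊢
        have := ih c hd (by omega)
        omega

-- if role = priority[c] occurs in s, the first index is ≤ c
theorem edB_firstIdx_le (rs : List String) (c : Nat) (role : String) (rest : List String)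
    (s : String) (hd : rs.drop c = role :: rest) (hyes : PySem.Str.isIn role s = true) :
    edB_firstIdx rs s ≤ c := by
  induction rs generalizing c with
  | nil => simp at hd
  | cons r rs ih =>
    cases c with
    | zero =>
      rw [List.drop_zero] at hd
      injection hd with h1 h2
      subst h1
      simp only [edB_firstIdx]
      rw [if_pos hyes]
    | succ c =>
      rw [List.drop_succ_cons] at hd
      simp only [edB_firstIdx]
      by_cases h : PySem.Str.isIn r s = true
      · rw [if_pos h]; omega
      · rw [if_neg h]
        have := ih c hd
        omega

-- the scan does nothing on a list of officers whose indices are all ≥ the current threshold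
theorem edB_scan_const (l : List (List (String × String)))
    (b : Option (List (String × String))) (i : Nat)
    (h : ∀ o ∈ l, i ≤ edIdx o) : l.foldl edB_step (b, i) = (b, i) := by
  induction l with
  | nil => simp
  | cons o rest ih =>
    have h0 : i ≤ edIdx o := h o (by simp)
    unfold edIdx at h0
    rw [List.foldl_cons]
    have hstep : edB_step (b, i) o = (b, i) := by
      simp only [edB_step]
      rw [if_neg (Nat.not_lt.mpr h0)]
    rw [hstep]
    exact ih (fun o' ho' => h o' (by simp [ho']))

-- the threshold component never drops below a common lower bound of the indices
theorem edB_scan_snd_ge (l : List (List (String × String)))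
    (b : Option (List (String × String))) (i j : Nat) (hji : j ≤ i)
    (h : ∀ o ∈ l, j ≤ edIdx o) : j ≤ (l.foldl edB_step (b, i)).2 := by
  induction l generalizing b i with
  | nil => simpa
  | cons o rest ih =>
    rw [List.foldl_cons]
    simp only [edB_step]
    split
    · exact ih _ _ (h o (by simp)) (fun o' ho' => h o' (by simp [ho']))
    · exact ih _ _ hji (fun o' ho' => h o' (by simp [ho']))

-- MAIN INVARIANT: if no officer matches a priority index < c and roles = priority[c:],
-- A's remaining outer loop returns exactly the formatted best officer of B's scan
theorem edA_outer_eq_scan (roles : List String) (c : Nat)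
    (l : List (List (String × String)))
    (hd : priorityList.drop c = roles)
    (hge : ∀ o ∈ l, c ≤ edIdx o) :
    edA_outer l roles =
      (l.foldl edB_step (none, priorityList.length)).1.map (fun o => edB_fmt o "Director") := by
  induction roles generalizing c with
  | nil =>
    have hc : priorityList.length ≤ c := by
      by_contra hlt
      rw [List.drop_eq_nil_iff] at hd
      · omega
    rw [edB_scan_const l none priorityList.length
      (fun o ho => le_trans hc (hge o ho))]
    simp [edA_outer]
  | cons role roles ih =>
    have hclt : c < priorityList.length := by
      by_contra hc
      rw [List.drop_eq_nil_iff.mpr (by omega)] at hd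
      exact absurd hd (by simp)
    have hd' : priorityList.drop (c + 1) = roles := by
      have h1 : priorityList.drop (c + 1) = (priorityList.drop c).drop 1 := by
        rw [List.drop_drop]
      rw [h1, hd, List.drop_one, List.tail_cons]
    simp only [edA_outer, edA_inner_eq]
    cases hfind : l.find? (fun o => PySem.Str.isIn role (edB_norm o)) with
    | none =>
      have hnone : ∀ o ∈ l, ¬ PySem.Str.isIn role (edB_norm o) = true := by
        intro o ho
        have := List.find?_eq_none.mp hfind o ho
        simpa using this
      have hge' : ∀ o ∈ l, c + 1 ≤ edIdx o := fun o ho =>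
        edB_firstIdx_ge_succ priorityList c role roles (edB_norm o) hd (hge o ho) (hnone o ho)
      simpa only [Option.map_none] using ih (c + 1) hd' hge'
    | some o =>
      obtain ⟨ho, as, bs, hl, has⟩ := List.find?_eq_some_iff_append.mp hfind
      have hoi : edIdx o = c := by
        have h1 : edIdx o ≤ c :=
          edB_firstIdx_le priorityList c role roles (edB_norm o) hd ho
        have h2 : c ≤ edIdx o := hge o (by rw [hl]; simp)
        omega
      have hscan : (l.foldl edB_step (none, priorityList.length)).1 = some o := by
        rw [hl, List.foldl_append, List.foldl_cons]
        have hi' : c + 1 ≤ (as.foldl edB_step (none, priorityList.length)).2 := by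
          apply edB_scan_snd_ge
          · omega
          · intro a ha
            refine edB_firstIdx_ge_succ priorityList c role roles (edB_norm a) hd
              (hge a (by rw [hl]; simp [ha])) ?_
            have := has a ha
            simpa using this
        have hstep : edB_step (as.foldl edB_step (none, priorityList.length)) o = (some o, edIdx o) := by
          simp only [edB_step]
          rw [if_pos (by unfold edIdx at hoi; omega)]
          rfl
        rw [hstep, hoi]
        rw [edB_scan_const bs (some o) c
          (fun o' ho' => hge o' (by rw [hl]; simp [ho']))]
      rw [hscan]
      rfl

-- defining equation of extract_director_alt with the let opened (by rfl)
theorem edB_alt_eq (officers : List (List (String × String))) :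
    extract_director_alt officers =
      match (officers.foldl edB_step (none, priorityList.length)).1 with
      | some o => some (edB_fmt o "Director")
      | none =>
        match officers with
        | [] => none
        | o0 :: _ => some (edB_fmt o0 "Officer") := rfl

-- ===== VERDICT (by name: the statement is the Claim_ definition above) =====
theorem extract_director_spec : Claim_equal_extract_director := by
  intro officers _
  unfold Spec_extract_director extract_director
  rw [edB_alt_eq, edA_outer_eq_scan priorityList 0 officers rfl (fun o _ => Nat.zero_le _)]
  cases hsc : (officers.foldl edB_step (none, priorityList.length)).1 with
  | some o => rfl
  | none =>
    cases officers with
    | nil => rfl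
    | cons o0 rest => rfl
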